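-- pv_equiv track=rewrite | github.com/mihirballari/fimg | engine/blast.py | strip_skip_flag
-- ===== SOURCE A (Python) =====
-- def strip_skip_flag(argv):
--     skip = False
--     cleaned = []
--     in_message = False
--     for tok in argv:
--         if not in_message and tok == "-skip":
--             skip = True
--             continue
--         if not in_message and ":" in tok:
--             in_message = True
--         cleaned.append(tok)
--     return skip, cleaned
-- ===== SOURCE B (Python) =====
-- def strip_skip_flag(argv):
--     split = next((i for i, t in enumerate(argv) if ":" in t), len(argv))
--     prefix, suffix = argv[:split], argv[split:]
--     return "-skip" in prefix, [t for t in prefix if t != "-skip"] + suffix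
-- ===== Notes on version B (the rewrite author's own statement) =====
-- stated objective: alternative
-- what changed: Replaces the stateful in_message one-pass loop with locate-the-first-colon-token boundary, then filter the prefix and concatenate the untouched suffix.
import Mathlib
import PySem

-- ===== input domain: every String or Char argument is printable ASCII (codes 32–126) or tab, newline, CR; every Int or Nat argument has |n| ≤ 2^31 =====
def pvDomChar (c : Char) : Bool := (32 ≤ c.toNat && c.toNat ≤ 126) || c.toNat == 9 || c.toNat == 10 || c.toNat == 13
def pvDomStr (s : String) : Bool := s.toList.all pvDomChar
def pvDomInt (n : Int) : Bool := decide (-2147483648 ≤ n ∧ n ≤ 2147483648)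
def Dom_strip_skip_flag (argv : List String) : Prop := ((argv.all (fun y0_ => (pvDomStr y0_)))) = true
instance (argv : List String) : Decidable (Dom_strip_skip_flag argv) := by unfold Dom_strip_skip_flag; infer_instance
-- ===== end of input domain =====

-- B replaces A's stateful in_message one-pass loop by locating the first ':' token and
-- filtering only the prefix before it (alternative decomposition, same cost).

-- ===== PORT A =====
-- state: (skip, cleaned, in_message)
def strip_skip_flag (argv : List String) : Bool × List String :=
  let st := argv.foldl (fun (st : Bool × List String × Bool) tok =>
    if !st.2.2 && tok == "-skip" then (true, st.2.1, st.2.2)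
    else if !st.2.2 && PySem.Str.isIn ":" tok then (st.1, st.2.1 ++ [tok], true)
    else (st.1, st.2.1 ++ [tok], st.2.2)) (false, [], false)
  (st.1, st.2.1)

-- ===== PORT B =====
def strip_skip_flag_alt (argv : List String) : Bool × List String :=
  let split := (argv.findIdx? (fun t => PySem.Str.isIn ":" t)).getD argv.length
  let pre := argv.take split
  let suf := argv.drop split
  (pre.contains "-skip", pre.filter (fun t => t ≠ "-skip") ++ suf)

-- ===== PRECONDITION & SPEC =====
def Spec_strip_skip_flag (argv : List String) (out : Bool × List String) : Prop := out = strip_skip_flag_alt argv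
instance (argv : List String) (out : Bool × List String) : Decidable (Spec_strip_skip_flag argv out) := by unfold Spec_strip_skip_flag; infer_instance

-- ===== CLAIM (what is proved, stated in full; the proofs are below) =====
def Claim_equal_strip_skip_flag : Prop := ∀ (argv : List String), Dom_strip_skip_flag argv → Spec_strip_skip_flag argv (strip_skip_flag argv)

-- ===== LEMMAS AND PROOFS =====

-- A's loop body, named for the lemmas
def pvStepA (st : Bool × List String × Bool) (tok : String) : Bool × List String × Bool :=
  if !st.2.2 && tok == "-skip" then (true, st.2.1, st.2.2)
  else if !st.2.2 && PySem.Str.isIn ":" tok then (st.1, st.2.1 ++ [tok], true)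
  else (st.1, st.2.1 ++ [tok], st.2.2)

theorem stepA_eq : (fun (st : Bool × List String × Bool) tok =>
    if !st.2.2 && tok == "-skip" then (true, st.2.1, st.2.2)
    else if !st.2.2 && PySem.Str.isIn ":" tok then (st.1, st.2.1 ++ [tok], true)
    else (st.1, st.2.1 ++ [tok], st.2.2)) = pvStepA := rfl

-- once in_message is true the loop only appends the rest verbatim
theorem foldA_inm (l : List String) (skip : Bool) (acc : List String) :
    l.foldl pvStepA (skip, acc, true) = (skip, acc ++ l, true) := by
  induction l generalizing acc with
  | nil => simp
  | cons t l ih =>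
    simp only [List.foldl_cons, pvStepA]
    simpa using ih (acc ++ [t])

-- characterisation of the fold from an in_message = false state
theorem foldA_false (l : List String) (skip : Bool) (acc : List String) :
    l.foldl pvStepA (skip, acc, false) =
      (skip || ((l.take ((l.findIdx? (fun t => PySem.Str.isIn ":" t)).getD l.length)).contains "-skip"),
       acc ++ (l.take ((l.findIdx? (fun t => PySem.Str.isIn ":" t)).getD l.length)).filter (fun t => t ≠ "-skip")
           ++ l.drop ((l.findIdx? (fun t => PySem.Str.isIn ":" t)).getD l.length),
       (l.findIdx? (fun t => PySem.Str.isIn ":" t)).isSome) := by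
  induction l generalizing skip acc with
  | nil => simp
  | cons t l ih =>
    by_cases ht : t = "-skip"
    · subst ht
      have hcol : PySem.Str.isIn ":" "-skip" = false := by decide
      simp only [List.foldl_cons, pvStepA, Bool.not_false, Bool.true_and, beq_self_eq_true,
        if_true, List.findIdx?_cons, hcol, Bool.false_eq_true, if_false]
      rw [ih true acc]
      cases hf : l.findIdx? (fun t => PySem.Str.isIn ":" t) with
      | none => simp [List.take_of_length_le, List.drop_of_length_le]
      | some n => simp [List.take_succ_cons, List.drop_succ_cons]
    · have hts : ("-skip" = t) = False := by simp [Ne.symm ht]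
      cases hc : PySem.Str.isIn ":" t with
      | true =>
        simp only [List.foldl_cons, pvStepA, Bool.not_false, Bool.true_and, hc,
          beq_eq_false_iff_ne.mpr ht, Bool.false_eq_true, if_false, if_true,
          List.findIdx?_cons]
        rw [foldA_inm]
        simp
      | false =>
        simp only [List.foldl_cons, pvStepA, Bool.not_false, Bool.true_and, hc,
          beq_eq_false_iff_ne.mpr ht, Bool.false_eq_true, if_false, List.findIdx?_cons]
        rw [ih skip (acc ++ [t])]
        cases hf : l.findIdx? (fun t => PySem.Str.isIn ":" t) with
        | none => simp [List.take_of_length_le, List.drop_of_length_le, ht, hts]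
        | some n => simp [List.take_succ_cons, List.drop_succ_cons, ht, hts]

-- ===== VERDICT (by name: the statement is the Claim_ definition above) =====
theorem strip_skip_flag_spec : Claim_equal_strip_skip_flag := by
  intro argv _
  show strip_skip_flag argv = strip_skip_flag_alt argv
  unfold strip_skip_flag strip_skip_flag_alt
  rw [stepA_eq, foldA_false]
  simp
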